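-- pv_equiv track=rewrite | github.com/NIDHISH99444/CodingNinjas | IBPrep/flip.py | seats
-- ===== SOURCE A (Python) =====
-- def seats( A):
--     lst=[]
--     for i in range(len(A)):
--         if A[i]=='x':
--             lst.append(i)
--     med=len(lst)//2
--     lc,rc=0,0
--     for i in range(med,-1,-1):
--         lc+=lst[med]-lst[i]-(med-i)
--     for j in range(med+1,len(lst)):
--         rc+=lst[j]-lst[med]-(j-med)
--     return lc+rc%10000003
-- ===== SOURCE B (Python) =====
-- def seats(A):
--     lst = [i for i, c in enumerate(A) if c == 'x']
--     n = len(lst)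
--     med = n // 2
--     m = lst[med]
--     lc = (med + 1) * m - sum(lst[:med + 1]) - med * (med + 1) // 2
--     r = n - 1 - med
--     rc = sum(lst[med + 1:]) - r * m - r * (r + 1) // 2
--     return lc + rc % 10000003
-- ===== Notes on version B (the rewrite author's own statement) =====
-- stated objective: alternative
-- what changed: Replaces the index loop that collects positions with an enumerate comprehension and replaces the two element-by-element accumulation loops with closed-form triangular-number sums over slice sums.
import Mathlib
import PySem

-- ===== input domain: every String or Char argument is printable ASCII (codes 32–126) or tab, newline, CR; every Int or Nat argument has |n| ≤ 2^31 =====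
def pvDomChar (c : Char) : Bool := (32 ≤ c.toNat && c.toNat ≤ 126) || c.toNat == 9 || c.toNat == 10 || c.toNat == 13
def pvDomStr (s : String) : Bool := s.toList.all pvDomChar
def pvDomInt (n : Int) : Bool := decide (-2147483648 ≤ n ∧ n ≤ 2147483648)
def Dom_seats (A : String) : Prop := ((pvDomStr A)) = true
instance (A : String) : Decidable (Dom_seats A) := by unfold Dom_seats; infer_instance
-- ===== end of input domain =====

-- B replaces A's three loops by an enumerate comprehension and closed-form (triangular-number) slice sums.

-- ===== PORT A =====
def seats (A : String) : Int :=
  let chars := A.toList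
  let lst : List Int := (PySem.List.pyRange 0 (chars.length : Int) 1).foldl
      (fun l i => if PySem.List.pyGetD chars i ' ' = 'x' then l ++ [i] else l) []
  let med : Int := PySem.Int.floordiv (lst.length : Int) 2
  let lc : Int := (PySem.List.pyRange med (-1) (-1)).foldl
      (fun lc i => lc + (PySem.List.pyGetD lst med 0 - PySem.List.pyGetD lst i 0 - (med - i))) 0
  let rc : Int := (PySem.List.pyRange (med + 1) (lst.length : Int) 1).foldl
      (fun rc j => rc + (PySem.List.pyGetD lst j 0 - PySem.List.pyGetD lst med 0 - (j - med))) 0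
  lc + PySem.Int.mod rc 10000003

-- ===== PORT B =====
def seats_alt (A : String) : Int :=
  let lst : List Int := ((PySem.List.enumerate A.toList 0).filter (fun p => p.2 == 'x')).map (·.1)
  let n : Int := lst.length
  let med : Int := PySem.Int.floordiv n 2
  let m : Int := PySem.List.pyGetD lst med 0
  let lc : Int := (med + 1) * m - (PySem.List.slice lst none (some (med + 1))).sum
      - PySem.Int.floordiv (med * (med + 1)) 2
  let r : Int := n - 1 - med
  let rc : Int := (PySem.List.slice lst (some (med + 1)) none).sum - r * m
      - PySem.Int.floordiv (r * (r + 1)) 2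
  lc + PySem.Int.mod rc 10000003

-- ===== PRECONDITION & SPEC =====
-- Pre_ excludes exactly the strings containing no 'x': there the position list is empty and
-- both A and B raise IndexError on lst[med].
def Pre_seats (A : String) : Prop := 'x' ∈ A.toList
instance (A : String) : Decidable (Pre_seats A) := by unfold Pre_seats; infer_instance
def pvWitness_seats : String := "x.x"

def Spec_seats (A : String) (out : Int) : Prop := out = seats_alt A
instance (A : String) (out : Int) : Decidable (Spec_seats A out) := by unfold Spec_seats; infer_instance

-- ===== CLAIM (what is proved, stated in full; the proofs are below) =====
def Claim_equal_seats : Prop := ∀ (A : String), Dom_seats A → Pre_seats A → Spec_seats A (seats A)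

-- ===== LEMMAS AND PROOFS =====

theorem sum_slice_closed (L : List Int) (m c : Int) (a : Nat) (b : Nat) (hab : a ≤ b)
    (hb : b ≤ L.length) :
    2 * ((PySem.List.pyRange (a : Int) (b : Int) 1).map
          (fun j => PySem.List.pyGetD L j 0 - m - (j - c))).sum
      = 2 * ((L.take b).sum - (L.take a).sum) - 2 * ((b : Int) - (a : Int)) * m
        - ((b : Int) * ((b : Int) - 1) - (a : Int) * ((a : Int) - 1))
        + 2 * ((b : Int) - (a : Int)) * c := by
  induction b, hab using Nat.le_induction with
  | base => rw [PySem.List.pyRange_one_eq_nil (le_refl _)]; simp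
  | succ b hab ih =>
    have hblt : b < L.length := hb
    have hcast : ((b + 1 : Nat) : Int) = (b : Int) + 1 := by push_cast; ring
    rw [hcast, PySem.List.pyRange_one_succ_right (by exact_mod_cast hab), List.map_append,
        List.sum_append, List.sum_take_succ L b hblt]
    simp only [List.map_cons, List.map_nil, List.sum_cons, List.sum_nil,
        PySem.List.pyGetD_ofNat L b 0 hblt]
    have h := ih (Nat.le_of_lt hblt)
    linarith [h]

-- the common tail of both programs, on the shared position list L
theorem seats_core (L : List Int) (hL : L ≠ []) :
    (PySem.List.pyRange (PySem.Int.floordiv (L.length : Int) 2) (-1) (-1)).foldl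
        (fun lc i => lc + (PySem.List.pyGetD L (PySem.Int.floordiv (L.length : Int) 2) 0
          - PySem.List.pyGetD L i 0 - (PySem.Int.floordiv (L.length : Int) 2 - i))) 0
      + PySem.Int.mod ((PySem.List.pyRange (PySem.Int.floordiv (L.length : Int) 2 + 1) (L.length : Int) 1).foldl
        (fun rc j => rc + (PySem.List.pyGetD L j 0 - PySem.List.pyGetD L (PySem.Int.floordiv (L.length : Int) 2) 0
          - (j - PySem.Int.floordiv (L.length : Int) 2))) 0) 10000003
    = (PySem.Int.floordiv (L.length : Int) 2 + 1) * PySem.List.pyGetD L (PySem.Int.floordiv (L.length : Int) 2) 0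
        - (PySem.List.slice L none (some (PySem.Int.floordiv (L.length : Int) 2 + 1))).sum
        - PySem.Int.floordiv (PySem.Int.floordiv (L.length : Int) 2 * (PySem.Int.floordiv (L.length : Int) 2 + 1)) 2
      + PySem.Int.mod ((PySem.List.slice L (some (PySem.Int.floordiv (L.length : Int) 2 + 1)) none).sum
        - ((L.length : Int) - 1 - PySem.Int.floordiv (L.length : Int) 2) * PySem.List.pyGetD L (PySem.Int.floordiv (L.length : Int) 2) 0
        - PySem.Int.floordiv (((L.length : Int) - 1 - PySem.Int.floordiv (L.length : Int) 2)
            * (((L.length : Int) - 1 - PySem.Int.floordiv (L.length : Int) 2) + 1)) 2) 10000003 := by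
  have hN1 : 1 ≤ L.length := List.length_pos_iff.mpr hL
  have hMlt : L.length / 2 < L.length := Nat.div_lt_self (by omega) (by omega)
  have hmed : PySem.Int.floordiv (L.length : Int) 2 = ((L.length / 2 : Nat) : Int) := by
    exact_mod_cast PySem.Int.floordiv_natCast L.length 2
  rw [hmed]
  set N := L.length with hNdef
  set M := N / 2 with hMdef
  have hm : PySem.List.pyGetD L ((M : Int)) 0 = L[M] := PySem.List.pyGetD_ofNat L M 0 hMlt
  -- cast bookkeeping
  have hM1 : ((M : Int) + 1) = ((M + 1 : Nat) : Int) := by push_cast; ring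
  -- lc on the A side
  rw [PySem.List.pyRange_neg_one_eq_reverse]
  have hz : ((-1 : Int) + 1) = 0 := by ring
  rw [hz, PySem.List.foldl_add _ (fun i => PySem.List.pyGetD L (M : Int) 0 - PySem.List.pyGetD L i 0 - ((M : Int) - i)) 0,
      List.map_reverse, List.sum_reverse]
  have hneg : (fun i => PySem.List.pyGetD L (M : Int) 0 - PySem.List.pyGetD L i 0 - ((M : Int) - i))
      = fun j => -(PySem.List.pyGetD L j 0 - L[M] - (j - (M : Int))) := by
    funext j; rw [hm]; ring
  have hsum : ∀ (l : List Int), (l.map (fun j => -(PySem.List.pyGetD L j 0 - L[M] - (j - (M : Int))))).sum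
      = -((l.map (fun j => PySem.List.pyGetD L j 0 - L[M] - (j - (M : Int)))).sum) := by
    intro l
    rw [show (fun j => -(PySem.List.pyGetD L j 0 - L[M] - (j - (M : Int))))
        = (fun x => -x) ∘ (fun j => PySem.List.pyGetD L j 0 - L[M] - (j - (M : Int))) from rfl,
      ← List.map_map, ← List.sum_neg]
  rw [hneg, hsum]
  -- rc on the A side
  rw [PySem.List.foldl_add _ (fun j => PySem.List.pyGetD L j 0 - PySem.List.pyGetD L (M : Int) 0 - (j - (M : Int))) 0]
  -- slices on the B side
  rw [hM1, PySem.List.slice_to_natCast, PySem.List.slice_from_natCast]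
  -- closed forms
  have hlc := sum_slice_closed L (L[M]) (M : Int) 0 (M + 1) (by omega) (by omega)
  have hrc := sum_slice_closed L (L[M]) (M : Int) (M + 1) N (by omega) (by omega)
  -- triangular numbers
  have hT1 : PySem.Int.floordiv ((M : Int) * ((M + 1 : Nat) : Int)) 2 = ((M * (M + 1) / 2 : Nat) : Int) := by
    have : ((M : Int) * ((M + 1 : Nat) : Int)) = ((M * (M + 1) : Nat) : Int) := by push_cast; ring
    rw [this]; exact_mod_cast PySem.Int.floordiv_natCast (M * (M + 1)) 2
  have hT1e : 2 * ((M * (M + 1) / 2 : Nat) : Int) = (M : Int) * ((M : Int) + 1) := by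
    have h : 2 * (M * (M + 1) / 2) = M * (M + 1) := by
      have := Nat.div_two_mul_two_of_even (Nat.even_mul_succ_self M); omega
    calc 2 * ((M * (M + 1) / 2 : Nat) : Int) = ((2 * (M * (M + 1) / 2) : Nat) : Int) := by
          norm_cast
      _ = ((M * (M + 1) : Nat) : Int) := by rw [h]
      _ = (M : Int) * ((M : Int) + 1) := by push_cast; ring
  have hRdef : ((N : Int) - 1 - (M : Int)) = ((N - 1 - M : Nat) : Int) := by
    omega
  have hT2 : PySem.Int.floordiv (((N : Int) - 1 - (M : Int)) * (((N : Int) - 1 - (M : Int)) + 1)) 2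
      = (((N - 1 - M) * (N - 1 - M + 1) / 2 : Nat) : Int) := by
    have : (((N : Int) - 1 - (M : Int)) * (((N : Int) - 1 - (M : Int)) + 1))
        = (((N - 1 - M) * (N - 1 - M + 1) : Nat) : Int) := by rw [hRdef]; push_cast; ring
    rw [this]; exact_mod_cast PySem.Int.floordiv_natCast ((N - 1 - M) * (N - 1 - M + 1)) 2
  have hT2e : 2 * (((N - 1 - M) * (N - 1 - M + 1) / 2 : Nat) : Int)
      = ((N : Int) - 1 - (M : Int)) * (((N : Int) - 1 - (M : Int)) + 1) := by
    have h : 2 * ((N - 1 - M) * (N - 1 - M + 1) / 2) = (N - 1 - M) * (N - 1 - M + 1) := by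
      have := Nat.div_two_mul_two_of_even (Nat.even_mul_succ_self (N - 1 - M)); omega
    calc 2 * (((N - 1 - M) * (N - 1 - M + 1) / 2 : Nat) : Int)
          = ((2 * ((N - 1 - M) * (N - 1 - M + 1) / 2) : Nat) : Int) := by push_cast; ring
      _ = (((N - 1 - M) * (N - 1 - M + 1) : Nat) : Int) := by rw [h]
      _ = ((N - 1 - M : Nat) : Int) * (((N - 1 - M : Nat) : Int) + 1) := by push_cast; ring
      _ = ((N : Int) - 1 - (M : Int)) * (((N : Int) - 1 - (M : Int)) + 1) := by rw [← hRdef]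
  rw [hT1, hT2]
  -- take N L = L, and drop-sum
  have htakeN : (L.take N).sum = L.sum := by rw [hNdef, List.take_length]
  have hdrop : (L.take (M + 1)).sum + (L.drop (M + 1)).sum = L.sum := List.sum_take_add_sum_drop L (M + 1)
  have htake0 : (L.take 0).sum = 0 := by simp
  -- assemble
  have hMN : (M : Int) + 1 ≤ (N : Int) := by exact_mod_cast hMlt
  have hcast0 : ((0 : Nat) : Int) = 0 := by norm_num
  have h1 : -(((PySem.List.pyRange 0 ((M : Int) + 1) 1).map
        (fun j => PySem.List.pyGetD L j 0 - L[M] - (j - (M : Int)))).sum)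
      = ((M : Int) + 1) * L[M] - (L.take (M + 1)).sum - ((M * (M + 1) / 2 : Nat) : Int) := by
    rw [Nat.cast_zero, ← hM1] at hlc
    linarith [hlc, hT1e, htake0]
  have h2 : ((PySem.List.pyRange ((M : Int) + 1) ((N : Nat) : Int) 1).map
        (fun j => PySem.List.pyGetD L j 0 - L[M] - (j - (M : Int)))).sum
      = (L.drop (M + 1)).sum - ((N : Int) - 1 - (M : Int)) * L[M]
        - (((N - 1 - M) * (N - 1 - M + 1) / 2 : Nat) : Int) := by
    rw [← hM1] at hrc
    linarith [hrc, hT2e, hdrop, htakeN]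
  rw [hm, ← hM1, h1, h2, zero_add, zero_add]

theorem enum_filter_map (cs : List Char) (s : Nat) :
    ((PySem.List.enumerate cs (s : Int)).filter (fun p => p.2 == 'x')).map (·.1)
      = ((List.range cs.length).filter (fun k => cs.getD k ' ' == 'x')).map (fun k => ((s + k : Nat) : Int)) := by
  induction cs generalizing s with
  | nil => simp [PySem.List.enumerate]
  | cons c cs ih =>
    rw [PySem.List.enumerate_cons, List.filter_cons, List.length_cons, List.range_succ_eq_map,
        List.filter_cons]
    have h1 : ((s : Int) + 1) = ((s + 1 : Nat) : Int) := by push_cast; ring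
    have h2 : ((List.range cs.length).filter (fun k => cs.getD k ' ' == 'x')).map
        (fun k => ((s + 1 + k : Nat) : Int))
        = (((List.range cs.length).map Nat.succ).filter (fun k => (c :: cs).getD k ' ' == 'x')).map
        (fun k => ((s + k : Nat) : Int)) := by
      rw [List.filter_map, List.map_map]
      congr 1
      · funext k
        simp only [Function.comp_apply, Nat.succ_eq_add_one]
        congr 1
        omega
    by_cases hc : c = 'x'
    · subst hc
      rw [if_pos (by simp), if_pos (by simp), List.map_cons, h1, ih (s + 1), h2, List.map_cons]
      simp
    · rw [if_neg (by simp [hc]), if_neg (by simp [hc]), h1, ih (s + 1), h2]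

theorem lstA_eq (cs : List Char) :
    (PySem.List.pyRange 0 (cs.length : Int) 1).foldl
        (fun l i => if PySem.List.pyGetD cs i ' ' = 'x' then l ++ [i] else l) []
      = ((List.range cs.length).filter (fun k => cs.getD k ' ' == 'x')).map (fun k => ((k : Nat) : Int)) := by
  rw [PySem.List.pyRange_zero_nat, List.foldl_map]
  have hfn : (fun (l : List Int) (k : Nat) => if PySem.List.pyGetD cs (k : Int) ' ' = 'x' then l ++ [(k : Int)] else l)
      = fun l k => if (cs.getD k ' ' == 'x') = true then l ++ [((k : Nat) : Int)] else l := by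
    funext l k
    rw [PySem.List.pyGetD_natCast]
    simp only [beq_iff_eq]
  rw [hfn, PySem.List.foldl_append_if (fun k => cs.getD k ' ' == 'x') (fun k => ((k : Nat) : Int)) (List.range cs.length) []]
  rfl

theorem lstB_eq (cs : List Char) :
    ((PySem.List.enumerate cs 0).filter (fun p => p.2 == 'x')).map (·.1)
      = ((List.range cs.length).filter (fun k => cs.getD k ' ' == 'x')).map (fun k => ((k : Nat) : Int)) := by
  have h := enum_filter_map cs 0
  simpa using h

-- ===== VERDICT (by name: the statement is the Claim_ definition above) =====
theorem seats_spec : Claim_equal_seats := by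
  intro A _hdom hpre
  simp only [Spec_seats, seats, seats_alt]
  rw [lstA_eq A.toList, lstB_eq A.toList]
  have hL : ((List.range A.toList.length).filter (fun k => A.toList.getD k ' ' == 'x')).map
      (fun k => ((k : Nat) : Int)) ≠ [] := by
    obtain ⟨k, hk, hek⟩ := List.mem_iff_getElem.mp hpre
    have hk' : k ∈ (List.range A.toList.length).filter (fun k => A.toList.getD k ' ' == 'x') := by
      rw [List.mem_filter]
      exact ⟨List.mem_range.mpr hk, by simp [List.getElem?_eq_getElem hk, hek]⟩
    exact List.ne_nil_of_mem (List.mem_map_of_mem hk')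
  exact seats_core _ hL
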